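-- pv_equiv track=rewrite | github.com/kungfu-team/tenplex | state-transformer/training_state/repartition.py | map_requests
-- ===== SOURCE A (Python) =====
-- def map_requests(source_dim, target_dim, target_mp_size, rank):
--     """ returns the device AND lower and upper bound for a merged model """
--     full_size = target_dim * target_mp_size
--     (a, b) = (rank * target_dim, rank * target_dim + target_dim)
--     source_mp_size = full_size // source_dim
--     reqs = {}
--     for device in range(source_mp_size):
--         (c, d) = (device * source_dim, (device + 1) * source_dim)
--         if a < c:  # before
--             if b < c:  # before
--                 pass
--             elif c < b <= d:  # within
--                 reqs[device] = [c, b]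
--             elif d < b:  # after
--                 reqs[device] = [c, d]
--         elif c <= a < d:  # within
--             if b < c:  # before
--                 raise ValueError(f'b={b} is smaller than a={a}')
--             elif c < b <= d:  # within
--                 reqs[device] = [a, b]
--             elif d < b:  # after
--                 reqs[device] = [a, d]
--         elif d < a:  # after
--             pass
--
--     return reqs
-- ===== SOURCE B (Python) =====
-- def map_requests(source_dim, target_dim, target_mp_size, rank):
--     """ returns the device AND lower and upper bound for a merged model """
--     full_size = target_dim * target_mp_size
--     a = rank * target_dim
--     b = a + target_dim
--     source_mp_size = full_size // source_dim
--     # devices whose block [device*source_dim, (device+1)*source_dim) meets [a, b):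
--     # exactly those with a // source_dim <= device <= (b - 1) // source_dim,
--     # clamped to the existing devices 0 .. source_mp_size - 1
--     lo = max(0, a // source_dim)
--     hi = min(source_mp_size - 1, (b - 1) // source_dim)
--     reqs = {}
--     for device in range(lo, hi + 1):
--         c = device * source_dim
--         d = c + source_dim
--         reqs[device] = [max(a, c), min(b, d)]
--     return reqs
-- ===== Notes on version B (the rewrite author's own statement) =====
-- stated objective: faster
-- what changed: B computes the first and last overlapping source device directly with two floor divisions and iterates only that clamped range, inserting the clipped interval [max(a,c), min(b,d)], instead of scanning all source_mp_size devices with a branch cascade.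
-- outside the precondition, e.g. on map_requests(-2, 2, -2, -1): A returns {0: [0, -2]}, B returns {}
import Mathlib
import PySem

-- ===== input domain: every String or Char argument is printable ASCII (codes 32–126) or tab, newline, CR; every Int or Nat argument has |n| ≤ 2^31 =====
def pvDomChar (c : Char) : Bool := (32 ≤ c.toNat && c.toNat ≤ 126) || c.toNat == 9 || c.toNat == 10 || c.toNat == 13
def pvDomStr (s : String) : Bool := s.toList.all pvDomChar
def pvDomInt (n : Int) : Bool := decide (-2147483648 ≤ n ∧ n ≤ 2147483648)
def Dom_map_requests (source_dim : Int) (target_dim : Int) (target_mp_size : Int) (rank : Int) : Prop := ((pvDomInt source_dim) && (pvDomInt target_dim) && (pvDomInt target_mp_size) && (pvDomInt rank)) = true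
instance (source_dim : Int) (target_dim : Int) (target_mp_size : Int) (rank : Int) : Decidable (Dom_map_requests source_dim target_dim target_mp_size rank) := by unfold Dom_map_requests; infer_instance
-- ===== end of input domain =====

-- B computes the two overlapping device indices by floor division and iterates only the
-- overlap range instead of scanning every source device (asymptotically fewer iterations).

-- ===== PORT A =====
def map_requests (source_dim : Int) (target_dim : Int) (target_mp_size : Int) (rank : Int) : List (Int × List Int) :=
  let full_size := target_dim * target_mp_size
  let a := rank * target_dim
  let b := rank * target_dim + target_dim
  -- source_dim = 0 raises ZeroDivisionError in Python; excluded by Pre_map_requests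
  let source_mp_size := PySem.Int.floordiv full_size source_dim
  let reqs : PySem.Dict Int (List Int) :=
    (PySem.List.pyRange 0 source_mp_size 1).foldl (fun reqs device =>
      let c := device * source_dim
      let d := (device + 1) * source_dim
      if a < c then  -- before
        if b < c then reqs  -- before
        else if c < b ∧ b ≤ d then reqs.insert device [c, b]  -- within
        else if d < b then reqs.insert device [c, d]  -- after
        else reqs
      else if c ≤ a ∧ a < d then  -- within
        if b < c then reqs  -- Python: raise ValueError — excluded by Pre_map_requests
        else if c < b ∧ b ≤ d then reqs.insert device [a, b]  -- within
        else if d < b then reqs.insert device [a, d]  -- after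
        else reqs
      else reqs) PySem.Dict.empty  -- 'elif d < a: pass' and the missing a = d case both leave reqs unchanged
  reqs.items

-- ===== PORT B =====
def map_requests_alt (source_dim : Int) (target_dim : Int) (target_mp_size : Int) (rank : Int) : List (Int × List Int) :=
  let full_size := target_dim * target_mp_size
  let a := rank * target_dim
  let b := a + target_dim
  let source_mp_size := PySem.Int.floordiv full_size source_dim
  let lo := max 0 (PySem.Int.floordiv a source_dim)
  let hi := min (source_mp_size - 1) (PySem.Int.floordiv (b - 1) source_dim)
  let reqs : PySem.Dict Int (List Int) :=
    (PySem.List.pyRange lo (hi + 1) 1).foldl (fun reqs device =>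
      let c := device * source_dim
      let d := c + source_dim
      reqs.insert device [max a c, min b d]) PySem.Dict.empty
  reqs.items

-- ===== PRECONDITION & SPEC =====
-- Pre_ excludes source_dim ≤ 0 (source_dim = 0 raises ZeroDivisionError; a negative source_dim
-- is a negative chunk size outside the task's natural domain, where A emits reversed intervals),
-- and the inputs with 0 < source_dim on which A raises ValueError (the device block containing
-- a = rank*target_dim exists but ends before b).
def Pre_map_requests (source_dim : Int) (target_dim : Int) (target_mp_size : Int) (rank : Int) : Prop :=
  0 < source_dim ∧
  ¬ (0 ≤ PySem.Int.floordiv (rank * target_dim) source_dim ∧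
     PySem.Int.floordiv (rank * target_dim) source_dim < PySem.Int.floordiv (target_dim * target_mp_size) source_dim ∧
     rank * target_dim + target_dim < PySem.Int.floordiv (rank * target_dim) source_dim * source_dim)
instance (source_dim : Int) (target_dim : Int) (target_mp_size : Int) (rank : Int) : Decidable (Pre_map_requests source_dim target_dim target_mp_size rank) := by unfold Pre_map_requests; infer_instance

def pvWitness_map_requests : Int × Int × Int × Int := (2, 3, 2, 1)

def Spec_map_requests (source_dim : Int) (target_dim : Int) (target_mp_size : Int) (rank : Int) (out : List (Int × List Int)) : Prop := out = map_requests_alt source_dim target_dim target_mp_size rank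
instance (source_dim : Int) (target_dim : Int) (target_mp_size : Int) (rank : Int) (out : List (Int × List Int)) : Decidable (Spec_map_requests source_dim target_dim target_mp_size rank out) := by unfold Spec_map_requests; infer_instance

-- ===== CLAIM (what is proved, stated in full; the proofs are below) =====
def Claim_equal_map_requests : Prop := ∀ (source_dim : Int) (target_dim : Int) (target_mp_size : Int) (rank : Int), Dom_map_requests source_dim target_dim target_mp_size rank → Pre_map_requests source_dim target_dim target_mp_size rank → Spec_map_requests source_dim target_dim target_mp_size rank (map_requests source_dim target_dim target_mp_size rank)

-- ===== LEMMAS AND PROOFS =====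

-- a filtered ascending unit range is again a unit range, with clamped endpoints
lemma filter_pyRange (u v lo hi : Int) :
    (PySem.List.pyRange u v 1).filter (fun x => decide (lo ≤ x ∧ x ≤ hi))
      = PySem.List.pyRange (max u lo) (min v (hi + 1)) 1 := by
  apply List.Perm.eq_of_pairwise (le := (· < ·))
  · intro x y _ _ h1 h2; exact absurd h2 (lt_asymm h1)
  · exact (PySem.List.pairwise_lt_pyRange_one u v).filter _
  · exact PySem.List.pairwise_lt_pyRange_one _ _
  · rw [List.perm_ext_iff_of_nodup ((PySem.List.nodup_pyRange_one u v).filter _) (PySem.List.nodup_pyRange_one _ _)]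
    intro x
    simp only [List.mem_filter, PySem.List.mem_pyRange_one, decide_eq_true_eq]
    omega

-- A's loop body, for 0 < s, is "insert the clipped interval iff the blocks overlap"
lemma stepA_eq (s a b dev : Int) (hs : 0 < s) (reqs : PySem.Dict Int (List Int)) :
    (if a < dev * s then
       if b < dev * s then reqs
       else if dev * s < b ∧ b ≤ (dev + 1) * s then reqs.insert dev [dev * s, b]
       else if (dev + 1) * s < b then reqs.insert dev [dev * s, (dev + 1) * s]
       else reqs
     else if dev * s ≤ a ∧ a < (dev + 1) * s then
       if b < dev * s then reqs
       else if dev * s < b ∧ b ≤ (dev + 1) * s then reqs.insert dev [a, b]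
       else if (dev + 1) * s < b then reqs.insert dev [a, (dev + 1) * s]
       else reqs
     else reqs)
    = (if a < (dev + 1) * s ∧ dev * s < b then
         reqs.insert dev [max a (dev * s), min b (dev * s + s)] else reqs) := by
  have hd : (dev + 1) * s = dev * s + s := by ring
  rw [hd]
  by_cases hcond : a < dev * s + s ∧ dev * s < b
  · rw [if_pos hcond]
    split_ifs <;>
      first
        | (exfalso; omega)
        | (congr 1; simp only [List.cons.injEq, and_true]; omega)
  · rw [if_neg hcond]
    split_ifs <;> first | rfl | (exfalso; omega)

theorem map_requests_eq_alt (source_dim target_dim target_mp_size rank : Int)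
    (hs : 0 < source_dim) :
    map_requests source_dim target_dim target_mp_size rank
      = map_requests_alt source_dim target_dim target_mp_size rank := by
  unfold map_requests map_requests_alt
  dsimp only
  set s := source_dim with hsdef
  set a := rank * target_dim with ha
  set b := rank * target_dim + target_dim with hb
  set smp := PySem.Int.floordiv (target_dim * target_mp_size) s with hsmp
  set lo' := PySem.Int.floordiv a s with hlo
  set hi' := PySem.Int.floordiv (b - 1) s with hhi
  -- rewrite A's loop body into the "insert iff overlap" form
  have h1 :
      (PySem.List.pyRange 0 smp 1).foldl (fun reqs device =>
        if a < device * s then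
          if b < device * s then reqs
          else if device * s < b ∧ b ≤ (device + 1) * s then reqs.insert device [device * s, b]
          else if (device + 1) * s < b then reqs.insert device [device * s, (device + 1) * s]
          else reqs
        else if device * s ≤ a ∧ a < (device + 1) * s then
          if b < device * s then reqs
          else if device * s < b ∧ b ≤ (device + 1) * s then reqs.insert device [a, b]
          else if (device + 1) * s < b then reqs.insert device [a, (device + 1) * s]
          else reqs
        else reqs) PySem.Dict.empty
      = (PySem.List.pyRange 0 smp 1).foldl (fun reqs device =>
          if a < (device + 1) * s ∧ device * s < b then
            reqs.insert device [max a (device * s), min b (device * s + s)] else reqs)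
          PySem.Dict.empty := by
    apply List.foldl_ext
    intro reqs device _
    exact stepA_eq s a b device hs reqs
  rw [h1]
  -- turn the conditional fold into a fold over the filtered range
  have h2 :
      (PySem.List.pyRange 0 smp 1).foldl (fun reqs device =>
        if a < (device + 1) * s ∧ device * s < b then
          reqs.insert device [max a (device * s), min b (device * s + s)] else reqs)
        PySem.Dict.empty
      = ((PySem.List.pyRange 0 smp 1).filter
            (fun device => decide (a < (device + 1) * s ∧ device * s < b))).foldl
          (fun reqs device =>
            reqs.insert device [max a (device * s), min b (device * s + s)])
          PySem.Dict.empty := by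
    rw [List.foldl_filter]
    simp only [decide_eq_true_eq]
  rw [h2]
  -- the overlap condition is exactly lo' ≤ device ≤ hi'
  have h3 : ((PySem.List.pyRange 0 smp 1).filter
        (fun device => decide (a < (device + 1) * s ∧ device * s < b)))
      = (PySem.List.pyRange 0 smp 1).filter (fun device => decide (lo' ≤ device ∧ device ≤ hi')) := by
    apply List.filter_congr
    intro device _
    have hA : device + 1 ≤ lo' ↔ (device + 1) * s ≤ a := PySem.Int.le_floordiv_iff_mul_le hs
    have hB : device ≤ hi' ↔ device * s ≤ b - 1 := PySem.Int.le_floordiv_iff_mul_le hs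
    simp only [decide_eq_decide]
    omega
  rw [h3, filter_pyRange]
  -- the two ranges coincide, and the loop bodies are definitionally the same
  have h4 : min smp (hi' + 1) = min (smp - 1) hi' + 1 := by omega
  rw [h4]

-- ===== VERDICT (by name: the statement is the Claim_ definition above) =====
theorem map_requests_spec : Claim_equal_map_requests := by
  intro source_dim target_dim target_mp_size rank _ hpre
  unfold Spec_map_requests
  exact map_requests_eq_alt source_dim target_dim target_mp_size rank hpre.1
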